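-- pv_equiv track=rewrite | github.com/PeterAdam2015/summarization | utils/create_datasets.py | abstract2sents
-- ===== SOURCE A (Python) =====
-- def abstract2sents(abstract):
--     """
--     translate the abstract ids to a list of sentences, may be not
--     useful in this match setting.
--     """
--     cur = 0
--     sents = []
--     while True:
--         try:
--             start_p = abstract.index('SOS', cur)
--             end_p = abstract.index('EOS', start_p + 1)
--             cur = end_p + len('EOS')
--             sents.append(abstract[start_p+len('SOS'):end_p])
--         except ValueError as e: # no more sentences
--             return sents
-- ===== SOURCE B (Python) =====
-- def abstract2sents(abstract):
--     sents = []
--     buf = None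
--     i = 0
--     n = len(abstract)
--     while i < n:
--         if buf is None:
--             if abstract.startswith('SOS', i):
--                 buf = []
--                 i += 3
--             else:
--                 i += 1
--         else:
--             if abstract.startswith('EOS', i):
--                 sents.append(''.join(buf))
--                 buf = None
--                 i += 3
--             else:
--                 buf.append(abstract[i])
--                 i += 1
--     return sents
-- ===== Notes on version B (the rewrite author's own statement) =====
-- stated objective: alternative
-- what changed: Replaced the try/except index-and-slice loop with a single left-to-right character scan (a two-state machine: outside/inside a sentence) that never slices or re-searches.
import Mathlib
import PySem

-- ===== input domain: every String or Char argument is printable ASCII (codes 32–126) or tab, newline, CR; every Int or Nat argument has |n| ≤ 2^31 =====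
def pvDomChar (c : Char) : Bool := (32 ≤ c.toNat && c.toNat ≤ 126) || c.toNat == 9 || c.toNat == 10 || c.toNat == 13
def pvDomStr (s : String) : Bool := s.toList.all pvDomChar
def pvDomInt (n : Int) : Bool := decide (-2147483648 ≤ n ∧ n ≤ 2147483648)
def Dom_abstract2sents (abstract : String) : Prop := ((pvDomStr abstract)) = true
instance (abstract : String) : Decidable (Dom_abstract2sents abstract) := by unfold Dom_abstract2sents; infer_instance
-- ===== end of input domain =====

-- B replaces A's try/except index-and-slice loop by one character-by-character two-state scan; objective: alternative (same cost).

-- ===== PORT A =====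
-- A's 'while True: start_p = abstract.index('SOS', cur); end_p = abstract.index('EOS', start_p+1); …'
-- ported with a fuel counter that only makes the loop total (abstract.index(sub, start) = PySem.Chars.findFrom;
-- .index raising ValueError = findFrom returning -1, which is exactly where A catches and returns sents).
def abstract2sentsLoop (cs : List Char) : Nat → List String → Int → List String
  | 0, sents, _ => sents
  | fuel + 1, sents, cur =>
    let sp := PySem.Chars.findFrom cs ['S','O','S'] cur
    if sp = -1 then sents
    else
      let ep := PySem.Chars.findFrom cs ['E','O','S'] (sp + 1)
      if ep = -1 then sents
      else
        abstract2sentsLoop cs fuel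
          (sents ++ [String.mk (PySem.Chars.slice cs (some (sp + 3)) (some ep))]) (ep + 3)

def abstract2sents (abstract : String) : List String :=
  abstract2sentsLoop abstract.toList (abstract.toList.length + 1) [] 0

-- ===== PORT B =====
-- B's while loop over index i with state buf (None = outside a sentence), ported as recursion on the
-- remaining suffix of the character list; ''.join(buf) = String.mk buf.
def abstract2sentsScan : List Char → Option (List Char) → List String → List String
  | [], _, sents => sents
  | c :: r, none, sents =>
    if PySem.Chars.startswith (c :: r) ['S','O','S'] then
      abstract2sentsScan ((c :: r).drop 3) (some []) sents
    else
      abstract2sentsScan r none sents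
  | c :: r, some buf, sents =>
    if PySem.Chars.startswith (c :: r) ['E','O','S'] then
      abstract2sentsScan ((c :: r).drop 3) none (sents ++ [String.mk buf])
    else
      abstract2sentsScan r (some (buf ++ [c])) sents
termination_by l _ _ => l.length
decreasing_by all_goals (simp only [List.length_drop, List.length_cons]; omega)

def abstract2sents_alt (abstract : String) : List String :=
  abstract2sentsScan abstract.toList none []

-- ===== PRECONDITION & SPEC =====
def Spec_abstract2sents (abstract : String) (out : List String) : Prop := out = abstract2sents_alt abstract
instance (abstract : String) (out : List String) : Decidable (Spec_abstract2sents abstract out) := by unfold Spec_abstract2sents; infer_instance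

-- ===== CLAIM (what is proved, stated in full; the proofs are below) =====
def Claim_equal_abstract2sents : Prop := ∀ (abstract : String), Dom_abstract2sents abstract → Spec_abstract2sents abstract (abstract2sents abstract)

-- ===== LEMMAS AND PROOFS =====

lemma find_eq_zero_of_prefix {l sub : List Char} (h : sub <+: l) :
    PySem.Chars.find l sub = 0 := by
  have h0 : 0 ≤ PySem.Chars.find l sub := by
    rw [PySem.Chars.find_nonneg_iff]; exact h.isInfix
  obtain ⟨-, hmin⟩ := PySem.Chars.find_spec h0
  have : (PySem.Chars.find l sub).toNat = 0 := by
    by_contra hne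
    exact hmin 0 (Nat.pos_of_ne_zero hne) (by simpa using h)
  omega

lemma find_cons_of_not_prefix {c : Char} {r sub : List Char} (h : ¬ sub <+: c :: r) :
    PySem.Chars.find (c :: r) sub =
      if PySem.Chars.find r sub = -1 then -1 else PySem.Chars.find r sub + 1 := by
  by_cases hr : PySem.Chars.find r sub = -1
  · simp only [hr, if_pos]
    rw [PySem.Chars.find_eq_neg_one_iff] at hr ⊢
    rw [List.infix_cons_iff]
    rintro (h1 | h2)
    · exact h h1
    · exact hr h2
  · simp only [hr, if_false]
    have hrnn : 0 ≤ PySem.Chars.find r sub := by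
      have := PySem.Chars.neg_one_le_find r sub; omega
    have hcnn : 0 ≤ PySem.Chars.find (c :: r) sub := by
      rw [PySem.Chars.find_nonneg_iff, List.infix_cons_iff]
      right
      rw [← PySem.Chars.find_nonneg_iff]; exact hrnn
    obtain ⟨hkpre, hkmin⟩ := PySem.Chars.find_spec hrnn
    obtain ⟨hmpre, hmmin⟩ := PySem.Chars.find_spec hcnn
    set m := (PySem.Chars.find (c :: r) sub).toNat with hm
    set k := (PySem.Chars.find r sub).toNat with hk
    have hm0 : m ≠ 0 := by
      intro h0; rw [h0] at hmpre; exact h (by simpa using hmpre)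
    have h1 : k ≤ m - 1 := by
      by_contra hlt
      have : sub <+: List.drop (m - 1) r := by
        have : List.drop m (c :: r) = List.drop (m - 1) r := by
          rw [show m = (m - 1) + 1 by omega, List.drop_succ_cons]
          simp
        rwa [this] at hmpre
      exact hkmin (m - 1) (by omega) this
    have h2 : m ≤ k + 1 := by
      by_contra hlt
      have : sub <+: List.drop (k + 1) (c :: r) := by
        simpa [List.drop_succ_cons] using hkpre
      exact hmmin (k + 1) (by omega) this
    have : m = k + 1 := by omega
    omega

lemma scan_out_eq :
    ∀ (l : List Char) (sents : List String),
      abstract2sentsScan l none sents =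
        if PySem.Chars.find l ['S','O','S'] = -1 then sents
        else abstract2sentsScan (l.drop ((PySem.Chars.find l ['S','O','S']).toNat + 3)) (some []) sents := by
  intro l
  induction l with
  | nil => intro sents; simp [abstract2sentsScan, show PySem.Chars.find [] ['S','O','S'] = -1 from by decide]
  | cons c r ih =>
    intro sents
    by_cases hp : ['S','O','S'] <+: c :: r
    · have hf := find_eq_zero_of_prefix hp
      rw [abstract2sentsScan]
      rw [if_pos (by rw [PySem.Chars.startswith_iff]; exact hp)]
      rw [hf]
      norm_num
    · have hf := find_cons_of_not_prefix hp
      rw [abstract2sentsScan]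
      rw [if_neg (by rw [PySem.Chars.startswith_iff]; exact hp)]
      rw [ih sents, hf]
      by_cases hr : PySem.Chars.find r ['S','O','S'] = -1
      · simp [hr]
      · have hrnn : 0 ≤ PySem.Chars.find r ['S','O','S'] := by
          have := PySem.Chars.neg_one_le_find r ['S','O','S']; omega
        rw [if_neg hr, if_neg (by omega), if_neg (by omega)]
        have : (PySem.Chars.find r ['S','O','S'] + 1).toNat
            = (PySem.Chars.find r ['S','O','S']).toNat + 1 := by omega
        rw [this]
        simp [List.drop_succ_cons]

lemma scan_in_eq :
    ∀ (l buf : List Char) (sents : List String),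
      abstract2sentsScan l (some buf) sents =
        if PySem.Chars.find l ['E','O','S'] = -1 then sents
        else abstract2sentsScan (l.drop ((PySem.Chars.find l ['E','O','S']).toNat + 3)) none
          (sents ++ [String.mk (buf ++ l.take (PySem.Chars.find l ['E','O','S']).toNat)]) := by
  intro l
  induction l with
  | nil => intro buf sents; simp [abstract2sentsScan, show PySem.Chars.find [] ['E','O','S'] = -1 from by decide]
  | cons c r ih =>
    intro buf sents
    by_cases hp : ['E','O','S'] <+: c :: r
    · have hf := find_eq_zero_of_prefix hp
      rw [abstract2sentsScan]
      rw [if_pos (by rw [PySem.Chars.startswith_iff]; exact hp)]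
      rw [hf]
      norm_num
    · have hf := find_cons_of_not_prefix hp
      rw [abstract2sentsScan]
      rw [if_neg (by rw [PySem.Chars.startswith_iff]; exact hp)]
      rw [ih (buf ++ [c]) sents, hf]
      by_cases hr : PySem.Chars.find r ['E','O','S'] = -1
      · simp [hr]
      · have hrnn : 0 ≤ PySem.Chars.find r ['E','O','S'] := by
          have := PySem.Chars.neg_one_le_find r ['E','O','S']; omega
        rw [if_neg hr, if_neg (by omega), if_neg (by omega)]
        have h1 : (PySem.Chars.find r ['E','O','S'] + 1).toNat
            = (PySem.Chars.find r ['E','O','S']).toNat + 1 := by omega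
        rw [h1]
        simp [List.drop_succ_cons, List.take_succ_cons]

lemma loop_eq_scan (cs : List Char) :
    ∀ (fuel : Nat) (cur : Nat) (sents : List String),
      cur ≤ cs.length → cs.length - cur < fuel →
      abstract2sentsLoop cs fuel sents (cur : Int) =
        abstract2sentsScan (cs.drop cur) none sents := by
  intro fuel
  induction fuel with
  | zero => intro cur sents h1 h2; omega
  | succ f ih =>
    intro cur sents hcur hfuel
    rw [abstract2sentsLoop]
    rw [PySem.Chars.findFrom_natCast cs ['S','O','S'] cur hcur]
    by_cases h1 : PySem.Chars.find (cs.drop cur) ['S','O','S'] = -1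
    · rw [if_pos (by simp [h1]), scan_out_eq, if_pos h1]
    · have hf0 : 0 ≤ PySem.Chars.find (cs.drop cur) ['S','O','S'] := by
        have := PySem.Chars.neg_one_le_find (cs.drop cur) ['S','O','S']; omega
      set f0 := (PySem.Chars.find (cs.drop cur) ['S','O','S']).toNat with hf0def
      have hf0eq : PySem.Chars.find (cs.drop cur) ['S','O','S'] = (f0 : Int) := by omega
      rw [if_neg (by omega)]
      simp only [if_neg h1]
      -- the SOS occurrence: ['S','O','S'] <+: cs.drop (cur + f0)
      obtain ⟨hspre, -⟩ := PySem.Chars.find_spec hf0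
      rw [hf0eq] at hspre
      simp only [Int.toNat_natCast, List.drop_drop] at hspre
      obtain ⟨t, ht⟩ := hspre
      have hlen3 : cur + f0 + 3 ≤ cs.length := by
        have := congrArg List.length ht
        simp [List.length_drop] at this
        omega
      have htdrop : cs.drop (cur + f0 + 3) = t := by
        have h3 := congrArg (List.drop 3) ht
        simp only [List.drop_drop, List.drop_append_of_le_length, List.length_cons] at h3
        simpa using h3.symm
      -- rewrite the EOS search start (↑cur + ↑f0 + 1) as ↑(cur + f0 + 1)
      have hcast : (cur : Int) + f0 + 1 = ((cur + f0 + 1 : Nat) : Int) := by push_cast; ring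
      rw [hf0eq, hcast,
        PySem.Chars.findFrom_natCast cs ['E','O','S'] (cur + f0 + 1) (by omega)]
      -- drop (cur+f0+1) cs = 'O' :: 'S' :: t
      have hdrop1 : cs.drop (cur + f0 + 1) = 'O' :: 'S' :: t := by
        have h4 : cs.drop (cur + f0 + 1) = (cs.drop (cur + f0)).drop 1 := by
          rw [List.drop_drop]
          try congr 1
          try omega
        rw [h4, ← ht]
        rfl
      have hnp1 : ¬ (['E','O','S'] <+: 'O' :: 'S' :: t) := by
        intro h; obtain ⟨u, hu⟩ := h; simp at hu
      have hnp2 : ¬ (['E','O','S'] <+: 'S' :: t) := by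
        intro h; obtain ⟨u, hu⟩ := h; simp at hu
      rw [hdrop1, find_cons_of_not_prefix hnp1, find_cons_of_not_prefix hnp2]
      by_cases h2 : PySem.Chars.find t ['E','O','S'] = -1
      · simp only [h2, if_pos, if_neg]
        rw [scan_out_eq, if_neg h1, hf0eq]
        simp only [Int.toNat_natCast, List.drop_drop]
        rw [show cur + (f0 + 3) = cur + f0 + 3 by ring, htdrop]
        rw [scan_in_eq, if_pos h2]
      · have he0 : 0 ≤ PySem.Chars.find t ['E','O','S'] := by
          have := PySem.Chars.neg_one_le_find t ['E','O','S']; omega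
        set e0 := (PySem.Chars.find t ['E','O','S']).toNat with he0def
        have he0eq : PySem.Chars.find t ['E','O','S'] = (e0 : Int) := by omega
        obtain ⟨hepre, -⟩ := PySem.Chars.find_spec he0
        rw [he0eq] at hepre
        simp only [Int.toNat_natCast] at hepre
        obtain ⟨u, hu⟩ := hepre
        have hlenE : cur + f0 + 3 + e0 + 3 ≤ cs.length := by
          have h4 : (t.drop e0).length = t.length - e0 := by simp
          have h5 := congrArg List.length hu
          have h6 := congrArg List.length htdrop
          simp [List.length_drop] at h5 h6
          omega
        rw [if_neg h2, if_neg (by omega), if_neg (by omega), if_neg (by omega)]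
        -- the int end index
        have hint : ((cur + f0 + 1 : Nat) : Int) + (PySem.Chars.find t ['E','O','S'] + 1 + 1)
            = ((cur + f0 + 3 + e0 : Nat) : Int) := by rw [he0eq]; push_cast; ring
        rw [hint]
        -- slice with nat bounds = take/drop
        have hslice : PySem.Chars.slice cs (some ((cur + f0 + 3 : Nat) : Int)) (some ((cur + f0 + 3 + e0 : Nat) : Int))
            = t.take e0 := by
          rw [PySem.Chars.slice_eq_listSlice, PySem.List.slice_natCast]
          rw [htdrop]
          congr 1
          omega
        have hcast2 : ((cur + f0 + 3 : Nat) : Int) = (cur : Int) + f0 + 3 := by push_cast; ring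
        rw [← hcast2, hslice]
        have hcast3 : ((cur + f0 + 3 + e0 : Nat) : Int) + 3 = ((cur + f0 + 3 + e0 + 3 : Nat) : Int) := by
          push_cast; ring
        rw [hcast3]
        -- the scan side consumes one full sentence
        have hR : abstract2sentsScan (cs.drop cur) none sents
            = abstract2sentsScan (cs.drop (cur + f0 + 3 + e0 + 3)) none
                (sents ++ [String.mk (List.take e0 t)]) := by
          rw [scan_out_eq, if_neg h1, hf0eq]
          simp only [Int.toNat_natCast, List.drop_drop]
          rw [show cur + (f0 + 3) = cur + f0 + 3 by ring, htdrop]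
          rw [scan_in_eq, if_neg h2, he0eq]
          simp only [Int.toNat_natCast, List.nil_append]
          rw [← htdrop, List.drop_drop]
          rw [show cur + f0 + 3 + (e0 + 3) = cur + f0 + 3 + e0 + 3 by ring]
        rw [ih (cur + f0 + 3 + e0 + 3) _ (by omega) (by omega), hR]

-- ===== VERDICT (by name: the statement is the Claim_ definition above) =====
theorem abstract2sents_spec : Claim_equal_abstract2sents := by
  intro abstract _
  unfold Spec_abstract2sents abstract2sents abstract2sents_alt
  have h := loop_eq_scan abstract.toList (abstract.toList.length + 1) 0 [] (by omega) (by omega)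
  simpa using h
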